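-- pv_equiv track=rewrite | github.com/V1sm4y/FairAI | app.py | guess_positive_label
-- ===== SOURCE A (Python) =====
-- def guess_positive_label(values):
--     hints = [
--         "1",
--         "true",
--         "yes",
--         "approved",
--         "accept",
--         "selected",
--         "hire",
--         "pass",
--         "positive",
--         "good",
--     ]
--     values = list(values)
--     if not values:
--         return None
--     for hint in hints:
--         for value in values:
--             if hint in str(value).strip().lower():
--                 return value
--     return values[-1]
-- ===== SOURCE B (Python) =====
-- def guess_positive_label(values):
--     hints = ["1", "true", "yes", "approved", "accept",
--              "selected", "hire", "pass", "positive", "good"]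
--
--     def priority(value):
--         text = str(value).strip().lower()
--         for i, hint in enumerate(hints):
--             if hint in text:
--                 return i
--         return len(hints)
--
--     values = list(values)
--     if not values:
--         return None
--     best, best_p = values[-1], len(hints)
--     for value in values:
--         p = priority(value)
--         if p < best_p:
--             best, best_p = value, p
--     return best
-- ===== Notes on version B (the rewrite author's own statement) =====
-- stated objective: alternative
-- what changed: A scans hint-major (for each hint, scan all values and return the first match); B makes a single value-major pass, computing each value's best-hint priority and tracking the minimum with strict-< updates so the earliest value wins ties, falling back to values[-1] when nothing matches.
import Mathlib
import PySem

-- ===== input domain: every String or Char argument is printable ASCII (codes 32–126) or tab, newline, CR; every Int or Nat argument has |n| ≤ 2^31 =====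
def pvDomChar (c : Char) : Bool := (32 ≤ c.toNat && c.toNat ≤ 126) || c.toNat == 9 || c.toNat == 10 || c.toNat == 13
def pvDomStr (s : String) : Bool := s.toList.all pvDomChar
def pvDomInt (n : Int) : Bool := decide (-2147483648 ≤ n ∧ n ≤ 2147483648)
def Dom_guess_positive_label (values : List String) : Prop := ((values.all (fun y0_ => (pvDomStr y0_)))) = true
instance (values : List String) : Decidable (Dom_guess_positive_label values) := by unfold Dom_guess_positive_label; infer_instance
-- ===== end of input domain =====

-- B replaces A's hint-major nested scan by a single pass over the values tracking the
-- minimum hint-priority (alternative decomposition; same asymptotic cost).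


-- ===== PORT A =====
-- the `hints` literal of both Pythons
def pvHints : List String :=
  ["1", "true", "yes", "approved", "accept", "selected", "hire", "pass", "positive", "good"]

-- str(value).strip().lower()  (values are strings, so str() is the identity)
def pvNorm (v : String) : String := PySem.Str.lower (PySem.Str.strip v)

-- outer `for hint in hints` loop; the inner `for value in values: if …: return value` is find?
def pvGoA : List String → List String → Option String
  | [], _ => none
  | h :: hs, vs =>
      match vs.find? (fun v => PySem.Str.isIn h (pvNorm v)) with
      | some v => some v
      | none => pvGoA hs vs

def guess_positive_label (values : List String) : Option String :=
  if values = [] then none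
  else
    match pvGoA pvHints values with
    | some v => some v
    | none => PySem.List.pyGet? values (-1)   -- values[-1]

-- ===== PORT B =====
-- priority(value): index of the first hint contained in the normalized value, else len(hints)
def pvPrio : List String → String → Nat
  | [], _ => 0
  | h :: hs, nv => if PySem.Str.isIn h nv then 0 else pvPrio hs nv + 1

def guess_positive_label_alt (values : List String) : Option String :=
  match values.getLast? with
  | none => none                                   -- if not values: return None
  | some lastv =>
      -- best, best_p = values[-1], len(hints); one pass with strict-< updates
      some (values.foldl
        (fun acc v =>
          let p := pvPrio pvHints (pvNorm v)
          if p < acc.2 then (v, p) else acc)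
        (lastv, pvHints.length)).1

-- ===== PRECONDITION & SPEC =====
def Spec_guess_positive_label (values : List String) (out : Option String) : Prop := out = guess_positive_label_alt values
instance (values : List String) (out : Option String) : Decidable (Spec_guess_positive_label values out) := by unfold Spec_guess_positive_label; infer_instance

-- ===== CLAIM (what is proved, stated in full; the proofs are below) =====
def Claim_equal_guess_positive_label : Prop := ∀ (values : List String), Dom_guess_positive_label values → Spec_guess_positive_label values (guess_positive_label values)

-- ===== LEMMAS AND PROOFS =====

-- the B-side fold step for a given hint list
def pvStep (hs : List String) (acc : String × Nat) (v : String) : String × Nat :=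
  let p := pvPrio hs (pvNorm v)
  if p < acc.2 then (v, p) else acc

-- once the tracked priority is 0 nothing ever updates
lemma pv_fold_stuck_zero (hs : List String) (vs : List String) (b : String) :
    vs.foldl (pvStep hs) (b, 0) = (b, 0) := by
  induction vs with
  | nil => rfl
  | cons v t ih => simpa [pvStep] using ih

-- if some value has priority 0, the fold returns the FIRST such value
lemma pv_fold_first_zero (hs : List String) :
    ∀ (vs : List String) (b : String) (n : Nat), 0 < n →
      ∀ v, vs.find? (fun v => pvPrio hs (pvNorm v) == 0) = some v →
      (vs.foldl (pvStep hs) (b, n)).1 = v := by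
  intro vs
  induction vs with
  | nil => intro b n hn v h; simp at h
  | cons w t ih =>
      intro b n hn v h
      by_cases hw : pvPrio hs (pvNorm w) = 0
      · have hv : v = w := by
          rw [List.find?_cons_of_pos (by simp [hw])] at h
          exact (Option.some.inj h).symm
        subst hv
        simp only [List.foldl_cons, pvStep, hw, hn, if_pos, pv_fold_stuck_zero]
      · rw [List.find?_cons_of_neg (by simp [hw])] at h
        by_cases hlt : pvPrio hs (pvNorm w) < n
        · simp only [List.foldl_cons, pvStep, if_pos hlt]
          exact ih w (pvPrio hs (pvNorm w)) (Nat.pos_of_ne_zero hw) v h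
        · simp only [List.foldl_cons, pvStep, if_neg hlt]
          exact ih b n hn v h

-- main loop correspondence: the one-pass minimum fold equals A's hint-major scan (default b)
lemma pv_main (hs : List String) : ∀ (vs : List String) (b : String),
    (vs.foldl (pvStep hs) (b, hs.length)).1
      = (match pvGoA hs vs with | some v => v | none => b) := by
  induction hs with
  | nil =>
      intro vs b
      simp only [pvGoA, List.length_nil]
      rw [pv_fold_stuck_zero]
  | cons h hs ih =>
      intro vs b
      cases hfind : vs.find? (fun v => PySem.Str.isIn h (pvNorm v)) with
      | some v =>
          have hfind' : vs.find? (fun v => pvPrio (h :: hs) (pvNorm v) == 0) = some v := by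
            have hpred : (fun v => pvPrio (h :: hs) (pvNorm v) == 0)
                 = (fun v => PySem.Str.isIn h (pvNorm v)) := by
              funext v
              simp only [pvPrio]
              cases hv : PySem.Str.isIn h (pvNorm v) <;> simp
            rw [hpred]; exact hfind
          rw [pv_fold_first_zero (h :: hs) vs b (h :: hs).length (by simp) v hfind']
          simp only [pvGoA]
          rw [hfind]
      | none =>
          have hnone : ∀ v ∈ vs, PySem.Str.isIn h (pvNorm v) = false := by
            intro v hv
            have := List.find?_eq_none.mp hfind v hv
            simpa using this
          have hcong : vs.foldl (pvStep (h :: hs)) (b, hs.length + 1)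
              = vs.foldl (fun acc v =>
                  if pvPrio hs (pvNorm v) + 1 < acc.2 then (v, pvPrio hs (pvNorm v) + 1) else acc)
                  (b, hs.length + 1) := by
            apply PySem.List.foldl_congr_mem
            intro acc v hv
            simp only [pvStep, pvPrio]
            rw [hnone v hv]
            simp
          have hshift : ∀ (t : List String) (b : String) (n : Nat),
              (t.foldl (fun acc v =>
                  if pvPrio hs (pvNorm v) + 1 < acc.2 then (v, pvPrio hs (pvNorm v) + 1) else acc)
                  (b, n + 1)).1 = (t.foldl (pvStep hs) (b, n)).1 := by
            intro t
            induction t with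
            | nil => intro b n; rfl
            | cons w t iht =>
                intro b n
                by_cases hlt : pvPrio hs (pvNorm w) < n
                · simp only [List.foldl_cons, Nat.succ_lt_succ hlt, if_pos, pvStep, if_pos hlt]
                  exact iht w (pvPrio hs (pvNorm w))
                · have h2 : ¬ pvPrio hs (pvNorm w) + 1 < n + 1 := by omega
                  simp only [List.foldl_cons, h2, if_neg, not_false_iff, pvStep, if_neg hlt]
                  exact iht b n
          have hlen : (h :: hs).length = hs.length + 1 := rfl
          rw [hlen, hcong, hshift vs b hs.length, ih vs b]
          simp only [pvGoA]
          rw [hfind]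

-- values[-1] on a nonempty list is its last element
lemma pv_pyGet_neg_one (vs : List String) (h : vs ≠ []) :
    PySem.List.pyGet? vs (-1) = some (vs.getLast h) := by
  cases vs with
  | nil => exact absurd rfl h
  | cons a t =>
      have h1 : 1 ≤ (a :: t).length := by simp
      have h2 : (a :: t).length - 1 < (a :: t).length := by omega
      simp only [PySem.List.pyGet?, PySem.List.pyIdx?]
      norm_num [h1]
      simp only [List.getLast_eq_getElem, List.length_cons, Nat.add_sub_cancel]
      rfl

-- ===== VERDICT (by name: the statement is the Claim_ definition above) =====
theorem guess_positive_label_spec : Claim_equal_guess_positive_label := by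
  intro values _
  unfold Spec_guess_positive_label guess_positive_label guess_positive_label_alt
  cases values with
  | nil => rfl
  | cons a t =>
      have hne : (a :: t) ≠ [] := by simp
      rw [if_neg hne, List.getLast?_eq_some_getLast hne]
      rw [show (fun (acc : String × Nat) (v : String) =>
            let p := pvPrio pvHints (pvNorm v)
            if p < acc.2 then (v, p) else acc) = pvStep pvHints from rfl]
      rw [show (match some ((a :: t).getLast hne) with
            | none => (none : Option String)
            | some lastv => some (List.foldl (pvStep pvHints) (lastv, pvHints.length) (a :: t)).1)
          = some (List.foldl (pvStep pvHints) ((a :: t).getLast hne, pvHints.length) (a :: t)).1 from rfl]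
      rw [pv_main pvHints (a :: t) ((a :: t).getLast hne)]
      cases hgo : pvGoA pvHints (a :: t) with
      | some v => rfl
      | none => rw [pv_pyGet_neg_one (a :: t) hne]
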